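-- pv_equiv track=rewrite | github.com/pythonLoader/Analyzing-hCov-Genome-Sequence | Classification_on_K_mer_One_Hot_Representation/Test.py | get_motifs
-- ===== SOURCE A (Python) =====
-- def get_motifs(length,seq):
--     (d,index) = ({}, 0)
--     permitted_list = ['A','C','G','T']
--     seq_k_mer_list = []
--     for i in range(0, len(seq)-length+1):
--         flag=0
--         word = seq[i:i+length]
--         for letter in word:
--             if letter not in permitted_list:
--                 flag=1
--         if(flag == 1):
--             continue
--         seq_k_mer_list.append(word)
--
--         # all_sequences_k_mer.append(seq_k_mer_list)
--     return seq_k_mer_list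
-- ===== SOURCE B (Python) =====
-- def get_motifs(length, seq):
--     # O(n + output): precompute, for each position j, the index of the first
--     # non-ACGT character at or after j; each window is then one O(1) test.
--     if length < 0:
--         return []  # no k-mers of negative length
--     n = len(seq)
--     allowed = {'A', 'C', 'G', 'T'}
--     next_bad = [n] * (n + 1)
--     for j in range(n - 1, -1, -1):
--         next_bad[j] = next_bad[j + 1] if seq[j] in allowed else j
--     out = []
--     for i in range(n - length + 1):
--         if next_bad[i] >= i + length:
--             out.append(seq[i:i + length])
--     return out
-- ===== Notes on version B (the rewrite author's own statement) =====
-- stated objective: faster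
-- what changed: Replaced A's per-window rescan of every character by a precomputed next-non-ACGT-index table, making each window a single O(1) comparison.
-- intended difference: For length < 0 the slice seq[i:i+length] wraps around via Python's negative-end rule, so A returns an accidental mix of truncated windows and empty strings; B returns [], the intended result for a negative k-mer length. — e.g. on get_motifs(-1, "A"): A returns ["", "", ""], B returns []
import Mathlib
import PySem

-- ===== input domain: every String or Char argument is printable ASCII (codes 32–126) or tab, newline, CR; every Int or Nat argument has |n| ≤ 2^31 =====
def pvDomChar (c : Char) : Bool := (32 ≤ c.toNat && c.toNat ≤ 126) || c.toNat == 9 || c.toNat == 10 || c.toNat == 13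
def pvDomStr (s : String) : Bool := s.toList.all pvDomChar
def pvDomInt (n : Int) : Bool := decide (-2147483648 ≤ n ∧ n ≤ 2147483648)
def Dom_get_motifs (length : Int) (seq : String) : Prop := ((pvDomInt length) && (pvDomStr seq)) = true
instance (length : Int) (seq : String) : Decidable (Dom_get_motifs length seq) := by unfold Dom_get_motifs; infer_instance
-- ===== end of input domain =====

-- B replaces A's per-window rescan by a precomputed next-non-ACGT-index table (one O(1) test
-- per window); objective: faster. B returns [] for negative `length` (see D_ below).

-- ===== PORT A =====
def get_motifs (length : Int) (seq : String) : List String :=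
  let permitted_list : List Char := ['A', 'C', 'G', 'T']
  (PySem.List.pyRange 0 (PySem.Str.len seq - length + 1) 1).foldl
    (fun seq_k_mer_list i =>
      let word := PySem.Str.slice seq (some i) (some (i + length))
      let flag : Int :=
        word.toList.foldl (fun flag letter => if letter ∈ permitted_list then flag else 1) 0
      if flag == 1 then seq_k_mer_list else seq_k_mer_list ++ [word])
    []

-- ===== PORT B =====
-- next_bad filled right to left: next_bad[j] = next_bad[j+1] if seq[j] allowed else j
def nbList (allowed : List Char) (n : Int) : List Char → Int → List Int
  | [], _ => [n]
  | c :: rest, j =>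
      let tail := nbList allowed n rest (j + 1)
      (if c ∈ allowed then tail.headD n else j) :: tail

def get_motifs_alt (length : Int) (seq : String) : List String :=
  if length < 0 then []
  else
    let allowed : List Char := ['A', 'C', 'G', 'T']
    let n : Int := PySem.Str.len seq
    let next_bad := nbList allowed n seq.toList 0
    (PySem.List.pyRange 0 (n - length + 1) 1).foldl
      (fun out i =>
        -- next_bad[i]: index provably in range (0 ≤ i ≤ n), so pyGetD is exact here
        if PySem.List.pyGetD next_bad i 0 ≥ i + length then
          out ++ [PySem.Str.slice seq (some i) (some (i + length))]
        else out)
      []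

-- ===== PRECONDITION & SPEC =====
-- For length < 0, A's slice seq[i:i+length] wraps around via Python's negative-index rule and A
-- returns an accidental mix of truncated windows and empty strings; B returns [], the intended
-- "no k-mers of negative length".
def D_get_motifs (length : Int) (seq : String) : Prop := length < 0
instance (length : Int) (seq : String) : Decidable (D_get_motifs length seq) := by
  unfold D_get_motifs; infer_instance

def Spec_get_motifs (length : Int) (seq : String) (out : List String) : Prop :=
  ¬ D_get_motifs length seq → out = get_motifs_alt length seq
instance (length : Int) (seq : String) (out : List String) : Decidable (Spec_get_motifs length seq out) := by
  unfold Spec_get_motifs; infer_instance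

def pvDiffWitness_get_motifs : Int × String := (-1, "A")
def pvDiffWitnessOut_get_motifs : (List String) × (List String) := (["", "", ""], [])

-- ===== CLAIM (what is proved, stated in full; the proofs are below) =====
def Claim_unchanged_get_motifs : Prop :=
  ∀ (length : Int) (seq : String), Dom_get_motifs length seq →
    Spec_get_motifs length seq (get_motifs length seq)

def Claim_changed_get_motifs : Prop :=
  Dom_get_motifs (pvDiffWitness_get_motifs.1) (pvDiffWitness_get_motifs.2) ∧
  D_get_motifs (pvDiffWitness_get_motifs.1) (pvDiffWitness_get_motifs.2) ∧
  get_motifs (pvDiffWitness_get_motifs.1) (pvDiffWitness_get_motifs.2) = pvDiffWitnessOut_get_motifs.1 ∧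
  get_motifs_alt (pvDiffWitness_get_motifs.1) (pvDiffWitness_get_motifs.2) = pvDiffWitnessOut_get_motifs.2 ∧
  pvDiffWitnessOut_get_motifs.1 ≠ pvDiffWitnessOut_get_motifs.2

def Claim_exact_get_motifs : Prop :=
  ∀ (length : Int) (seq : String), Dom_get_motifs length seq → D_get_motifs length seq →
    get_motifs length seq ≠ get_motifs_alt length seq

-- ===== LEMMAS AND PROOFS =====

-- A's inner flag loop computes 0/1 according to whether every letter is permitted
theorem pv_flag_eq (l : List Char) (f : Int) :
    l.foldl (fun flag letter =>
        if letter ∈ (['A', 'C', 'G', 'T'] : List Char) then flag else 1) f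
      = if l.all (fun c => decide (c ∈ (['A', 'C', 'G', 'T'] : List Char))) then f else 1 := by
  induction l generalizing f with
  | nil => simp
  | cons c l ih =>
    rw [List.foldl_cons, List.all_cons]
    by_cases h : c ∈ (['A', 'C', 'G', 'T'] : List Char)
    · rw [if_pos h, ih]
      simp [h]
    · rw [if_neg h, ih]
      simp [h]

-- index of the first non-allowed character of cs (absolute position j), n if none
def pvFb (allowed : List Char) (n : Int) : List Char → Int → Int
  | [], _ => n
  | c :: l, j => if c ∈ allowed then pvFb allowed n l (j + 1) else j

theorem pv_nb_length (allowed : List Char) (n : Int) (cs : List Char) (j : Int) :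
    (nbList allowed n cs j).length = cs.length + 1 := by
  induction cs generalizing j with
  | nil => simp [nbList]
  | cons c l ih => simp [nbList, ih]

theorem pv_nb_headD (allowed : List Char) (n : Int) (cs : List Char) (j d : Int) :
    (nbList allowed n cs j).headD d = pvFb allowed n cs j := by
  induction cs generalizing j d with
  | nil => simp [nbList, pvFb]
  | cons c l ih =>
    simp only [nbList]
    rw [List.headD_cons]
    by_cases h : c ∈ allowed
    · rw [if_pos h, ih, show pvFb allowed n (c :: l) j = pvFb allowed n l (j + 1) from by
        simp [pvFb, h]]
    · rw [if_neg h, show pvFb allowed n (c :: l) j = j from by simp [pvFb, h]]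

theorem pv_nb_getD (allowed : List Char) (n : Int) (cs : List Char) (j : Int) (k : Nat)
    (hk : k ≤ cs.length) :
    (nbList allowed n cs j).getD k 0 = pvFb allowed n (cs.drop k) (j + k) := by
  induction cs generalizing j k with
  | nil =>
    have hk0 : k = 0 := by simpa using hk
    subst hk0
    simp [nbList, pvFb]
  | cons c l ih =>
    cases k with
    | zero =>
      simp only [nbList, List.getD_cons_zero, List.drop_zero, Nat.cast_zero, add_zero]
      by_cases h : c ∈ allowed
      · rw [if_pos h, pv_nb_headD]
        simp [pvFb, h]
      · rw [if_neg h]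
        simp [pvFb, h]
    | succ k =>
      have hk' : k ≤ l.length := by simpa using hk
      simp only [nbList, List.getD_cons_succ, List.drop_succ_cons]
      rw [ih (j + 1) k hk']
      congr 1
      push_cast
      ring

theorem pv_fb_eq (allowed : List Char) (n : Int) (cs : List Char) (j : Int)
    (h : n = j + cs.length) :
    pvFb allowed n cs j
      = j + ((cs.takeWhile fun c => decide (c ∈ allowed)).length : Int) := by
  induction cs generalizing j with
  | nil =>
    simp only [pvFb, List.takeWhile_nil, List.length_nil, Nat.cast_zero, add_zero]
    simp at h
    omega
  | cons c l ih =>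
    by_cases hc : c ∈ allowed
    · have h' : n = (j + 1) + l.length := by simp at h; omega
      rw [show pvFb allowed n (c :: l) j = pvFb allowed n l (j + 1) from by simp [pvFb, hc],
        ih (j + 1) h', List.takeWhile_cons_of_pos (by simp [hc])]
      simp
      omega
    · rw [show pvFb allowed n (c :: l) j = j from by simp [pvFb, hc],
        List.takeWhile_cons_of_neg (by simp [hc])]
      simp

theorem pv_takeWhile_all (p : Char → Bool) (l : List Char) (k : Nat) (hk : k ≤ l.length) :
    (k ≤ (l.takeWhile p).length) ↔ (l.take k).all p := by
  induction l generalizing k with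
  | nil =>
    have hk0 : k = 0 := by simpa using hk
    subst hk0
    simp
  | cons c l ih =>
    cases k with
    | zero => simp
    | succ k =>
      have hk' : k ≤ l.length := by simpa using hk
      by_cases hp : p c = true
      · simp only [List.takeWhile_cons_of_pos hp, List.length_cons, List.take_succ_cons,
          List.all_cons, hp, Bool.true_and]
        rw [← ih k hk']
        omega
      · rw [List.takeWhile_cons_of_neg hp]
        simp [hp]

-- the core equality: for 0 ≤ length the two ports agree
theorem pv_main (length : Int) (seq : String) (h0 : 0 ≤ length) :
    get_motifs length seq = get_motifs_alt length seq := by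
  simp only [get_motifs, get_motifs_alt, if_neg (by omega : ¬ length < 0)]
  apply PySem.List.foldl_congr_mem
  intro acc i hi
  rw [PySem.List.mem_pyRange_one] at hi
  obtain ⟨hi0, hiu⟩ := hi
  rw [PySem.Str.len_eq] at hiu
  have hit : (i.toNat : Int) = i := Int.toNat_of_nonneg hi0
  have hint : i.toNat ≤ seq.toList.length := by omega
  -- the window's characters
  have hword : (PySem.Str.slice seq (some i) (some (i + length))).toList
      = (seq.toList.drop i.toNat).take length.toNat := by
    rw [show (PySem.Str.slice seq (some i) (some (i + length))).toList
          = PySem.List.slice seq.toList (some i) (some (i + length)) from by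
        simp [PySem.Str.slice, PySem.Chars.slice]]
    rw [PySem.List.slice_toNat seq.toList hi0 (by omega)]
    congr 1
    omega
  -- B's test is "every character of the window is allowed"
  have hcond : (PySem.List.pyGetD
        (nbList ['A', 'C', 'G', 'T'] (PySem.Str.len seq) seq.toList 0) i 0 ≥ i + length)
      ↔ (((seq.toList.drop i.toNat).take length.toNat).all
            fun c => decide (c ∈ (['A', 'C', 'G', 'T'] : List Char))) = true := by
    rw [PySem.List.pyGetD_eq_getElem _ _ hi0
        (by rw [pv_nb_length]; push_cast; omega)]
    rw [← List.getD_eq_getElem _ 0 (by rw [pv_nb_length]; omega)]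
    rw [pv_nb_getD _ _ _ _ _ hint]
    rw [pv_fb_eq _ _ _ _ (by rw [PySem.Str.len_eq, List.length_drop]; omega)]
    rw [← pv_takeWhile_all _ _ length.toNat (by rw [List.length_drop]; omega)]
    omega
  rw [pv_flag_eq, hword]
  by_cases hall : (((seq.toList.drop i.toNat).take length.toNat).all
      fun c => decide (c ∈ (['A', 'C', 'G', 'T'] : List Char))) = true
  · rw [if_pos hall, if_pos (hcond.mpr hall)]
    simp
  · rw [if_neg hall, if_neg (fun h => hall (hcond.mp h))]
    simp

-- ===== VERDICT (by name: the statement is the Claim_ definition above) =====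
theorem get_motifs_spec : Claim_unchanged_get_motifs := by
  intro length seq _ hnD
  have h0 : 0 ≤ length := by unfold D_get_motifs at hnD; omega
  exact pv_main length seq h0

theorem get_motifs_changed : Claim_changed_get_motifs := by
  unfold Claim_changed_get_motifs; decide

theorem get_motifs_tight : Claim_exact_get_motifs := by
  intro length seq _ hD
  unfold D_get_motifs at hD
  unfold get_motifs_alt
  rw [if_pos hD]
  unfold get_motifs
  simp only [PySem.Str.len_eq]
  intro hcontra
  set N : Int := (seq.toList.length : Int) with hN
  have hN0 : 0 ≤ N := by positivity
  have hsplit : PySem.List.pyRange 0 (N - length + 1) 1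
      = PySem.List.pyRange 0 (N - length) 1 ++ [N - length] :=
    PySem.List.pyRange_one_succ_right (by omega)
  rw [hsplit, List.foldl_append, List.foldl_cons, List.foldl_nil] at hcontra
  have hword : (PySem.Str.slice seq (some (N - length)) (some (N - length + length))).toList
      = [] := by
    rw [show (PySem.Str.slice seq (some (N - length)) (some (N - length + length))).toList
          = PySem.List.slice seq.toList (some (N - length)) (some (N - length + length)) from by
        simp [PySem.Str.slice, PySem.Chars.slice]]
    rw [PySem.List.slice_toNat seq.toList (by omega) (by omega)]
    rw [List.drop_eq_nil_of_le (by omega)]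
    simp
  rw [hword] at hcontra
  simp at hcontra
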